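-- pv_equiv track=rewrite | github.com/MarcinK420/MiniProjektyPython | miniprojekty/cieplozimno.py | getWskazowki
-- ===== SOURCE A (Python) =====
-- def getWskazowki(proba, sekretnaLiczba):
--     if proba == sekretnaLiczba:
--         return 'Brawo!!!'
--
--     wskazowki = []
--
--     for i in range(len(proba)):
--         if proba[i] == sekretnaLiczba[i]:
--             wskazowki.append('Goraco')
--         elif proba[i] in sekretnaLiczba:
--             wskazowki.append('Cieplo')
--     if len(wskazowki) == 0:
--         return 'Zimno'
--     else:
--         wskazowki.sort()
--         return ' '.join(wskazowki)
-- ===== SOURCE B (Python) =====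
-- def getWskazowki(proba, sekretnaLiczba):
--     if proba == sekretnaLiczba:
--         return 'Brawo!!!'
--     pary = list(zip(proba, sekretnaLiczba))
--     goraco = sum(1 for a, b in pary if a == b)
--     tajne = set(sekretnaLiczba)
--     cieplo = sum(1 for a, b in pary if a != b and a in tajne)
--     hinty = 'Cieplo ' * cieplo + 'Goraco ' * goraco
--     return hinty[:-1] if hinty else 'Zimno'
-- ===== Notes on version B (the rewrite author's own statement) =====
-- stated objective: idiomatic
-- what changed: B replaces A's indexed loop that appends tokens to a list and sorts it with two staged comprehension-style counts over zip(proba, sekret) plus a precomputed character set, then builds the answer directly by string repetition 'Cieplo '*c + 'Goraco '*g and slicing off the trailing space.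
import Mathlib
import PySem

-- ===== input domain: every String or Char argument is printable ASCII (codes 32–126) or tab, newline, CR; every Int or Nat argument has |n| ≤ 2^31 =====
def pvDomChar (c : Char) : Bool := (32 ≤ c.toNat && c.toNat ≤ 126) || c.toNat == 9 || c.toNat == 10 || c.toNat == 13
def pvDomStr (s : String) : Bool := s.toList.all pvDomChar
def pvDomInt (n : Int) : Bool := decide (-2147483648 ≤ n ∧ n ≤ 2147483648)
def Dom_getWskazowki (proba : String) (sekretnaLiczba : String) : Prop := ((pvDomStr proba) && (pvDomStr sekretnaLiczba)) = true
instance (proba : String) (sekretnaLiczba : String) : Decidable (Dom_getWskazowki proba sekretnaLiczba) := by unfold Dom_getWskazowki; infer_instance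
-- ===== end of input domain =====

-- B replaces the indexed loop + list append + sort with two staged counts over
-- zip(proba, sekret) and a precomputed character set, building the output by
-- string repetition and slicing off the trailing space; objective: idiomatic.

-- ===== PORT A =====
-- one loop iteration of A: 'if proba[i] == sekretnaLiczba[i]: append Goraco elif proba[i] in sekretnaLiczba: append Cieplo'
def pvStepA (p s : List Char) (acc : List String) (i : Int) : List String :=
  match PySem.List.pyGet? p i, PySem.List.pyGet? s i with
  | some a, some b =>
      if a == b then acc ++ ["Goraco"]
      else if s.contains a then acc ++ ["Cieplo"] else acc
  | _, _ => acc  -- Python raises IndexError here; these inputs are excluded by Pre_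

def getWskazowki (proba : String) (sekretnaLiczba : String) : String :=
  if proba == sekretnaLiczba then "Brawo!!!"
  else
    let p := proba.toList
    let s := sekretnaLiczba.toList
    let wskazowki := (PySem.List.pyRange 0 (p.length : Int) 1).foldl (pvStepA p s) []
    if wskazowki.length == 0 then "Zimno"
    else PySem.Str.join " " (PySem.List.sorted wskazowki (fun x => x) false)

-- ===== PORT B =====
-- transliteration of Source B: zip, two staged countP passes (the 0/1-generator sums),
-- 'Cieplo ' * cieplo + 'Goraco ' * goraco at the character level, hinty[:-1] = dropLast
def getWskazowki_alt (proba : String) (sekretnaLiczba : String) : String :=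
  if proba == sekretnaLiczba then "Brawo!!!"
  else
    let pary := proba.toList.zip sekretnaLiczba.toList
    let goraco := pary.countP (fun ab => ab.1 == ab.2)
    let tajne := PySem.Set.ofList sekretnaLiczba.toList
    let cieplo := pary.countP (fun ab => ab.1 != ab.2 && PySem.Set.contains tajne ab.1)
    let hinty := List.flatten (List.replicate cieplo "Cieplo ".toList ++ List.replicate goraco "Goraco ".toList)
    if hinty.isEmpty then "Zimno" else String.ofList hinty.dropLast

-- ===== PRECONDITION & SPEC =====
-- Pre_ excludes exactly the inputs where A raises IndexError: proba longer than
-- sekretnaLiczba and different from it (sekretnaLiczba[i] goes out of range).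
def Pre_getWskazowki (proba : String) (sekretnaLiczba : String) : Prop :=
  proba = sekretnaLiczba ∨ proba.toList.length ≤ sekretnaLiczba.toList.length
instance (proba : String) (sekretnaLiczba : String) : Decidable (Pre_getWskazowki proba sekretnaLiczba) := by unfold Pre_getWskazowki; infer_instance

def pvWitness_getWskazowki : String × String := ("321", "123")

def Spec_getWskazowki (proba : String) (sekretnaLiczba : String) (out : String) : Prop := out = getWskazowki_alt proba sekretnaLiczba
instance (proba : String) (sekretnaLiczba : String) (out : String) : Decidable (Spec_getWskazowki proba sekretnaLiczba out) := by unfold Spec_getWskazowki; infer_instance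

-- ===== CLAIM (what is proved, stated in full; the proofs are below) =====
def Claim_equal_getWskazowki : Prop := ∀ (proba : String) (sekretnaLiczba : String), Dom_getWskazowki proba sekretnaLiczba → Pre_getWskazowki proba sekretnaLiczba → Spec_getWskazowki proba sekretnaLiczba (getWskazowki proba sekretnaLiczba)


-- ===== LEMMAS AND PROOFS =====

-- the list A appends for index i (so that A's loop is a flatMap)
def pvDelta (p s : List Char) (i : Int) : List String := pvStepA p s [] i

-- the hint produced by one character pair (B's per-pair view of A's loop body)
def pvD (s : List Char) (a b : Char) : List String :=
  if a == b then ["Goraco"] else if s.contains a then ["Cieplo"] else []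

lemma pvStepA_acc (p s : List Char) (acc : List String) (i : Int) :
    pvStepA p s acc i = acc ++ pvDelta p s i := by
  simp only [pvDelta, pvStepA]
  cases hp : PySem.List.pyGet? p i <;> cases hq : PySem.List.pyGet? s i <;> simp
  split_ifs <;> simp

lemma pvFoldA_eq_flatMap (p s : List Char) (is : List Int) (acc : List String) :
    is.foldl (pvStepA p s) acc = acc ++ is.flatMap (pvDelta p s) := by
  rw [PySem.List.foldl_congr_mem is (pvStepA p s) (fun acc i => acc ++ pvDelta p s i) acc
    (fun acc x _ => pvStepA_acc p s acc x), PySem.List.foldl_append_eq_flatMap]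

lemma pvDelta_mem (p s : List Char) (i : Int) :
    ∀ x ∈ pvDelta p s i, x = "Cieplo" ∨ x = "Goraco" := by
  simp only [pvDelta, pvStepA]
  cases hp : PySem.List.pyGet? p i <;> cases hq : PySem.List.pyGet? s i <;> simp
  split_ifs <;> simp

-- zip as an indexed table (used to turn A's range-indexed loop into B's zip)
lemma pvZip_eq_map_range (p s : List Char) (h : p.length ≤ s.length) :
    p.zip s = (List.range p.length).map (fun k => (p.getD k ' ', s.getD k ' ')) := by
  induction p generalizing s with
  | nil => simp
  | cons a p ih =>
      cases s with
      | nil => simp at h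
      | cons b s =>
          simp only [List.zip_cons_cons, List.length_cons, List.range_succ_eq_map,
            List.map_cons, List.map_map]
          rw [ih s (by simpa using h)]
          simp [Function.comp_def]

-- A's flatMap over range(len(proba)) is B's flatMap over zip
lemma pvW_eq_zip (p s : List Char) (h : p.length ≤ s.length) :
    (PySem.List.pyRange 0 (p.length : Int) 1).flatMap (pvDelta p s)
      = (p.zip s).flatMap (fun ab => pvD s ab.1 ab.2) := by
  rw [PySem.List.pyRange_zero_nat, List.flatMap_map, pvZip_eq_map_range p s h, List.flatMap_map]
  apply List.flatMap_congr
  intro k hk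
  have hkp : k < p.length := List.mem_range.mp hk
  have hks : k < s.length := lt_of_lt_of_le hkp h
  simp only [pvDelta, pvStepA, pvD, PySem.List.pyGet?_natCast,
    List.getElem?_eq_getElem hkp, List.getElem?_eq_getElem hks,
    List.getD_eq_getElem _ _ hkp, List.getD_eq_getElem _ _ hks]
  split_ifs <;> simp

lemma pvContains_ofList (s : List Char) (a : Char) :
    PySem.Set.contains (PySem.Set.ofList s) a = s.contains a := by
  rw [Bool.eq_iff_iff, PySem.Set.contains_iff, PySem.Set.mem_ofList, List.contains_iff_mem]

lemma pvD_count_goraco (s : List Char) (a b : Char) :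
    (pvD s a b).count "Goraco" = if a == b then 1 else 0 := by
  unfold pvD; split_ifs <;> decide

lemma pvD_count_cieplo (s : List Char) (a b : Char) :
    (pvD s a b).count "Cieplo" = if (a != b && s.contains a) then 1 else 0 := by
  unfold pvD
  split_ifs <;> simp_all [bne]

-- the two counts of the hint list are B's two countP passes
lemma pvCount_goraco (s : List Char) (l : List (Char × Char)) :
    (l.flatMap (fun ab => pvD s ab.1 ab.2)).count "Goraco"
      = l.countP (fun ab => ab.1 == ab.2) := by
  induction l with
  | nil => simp
  | cons ab l ih =>
      simp only [List.flatMap_cons, List.count_append, List.countP_cons, ih, pvD_count_goraco]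
      split_ifs <;> omega

lemma pvCount_cieplo (s : List Char) (l : List (Char × Char)) :
    (l.flatMap (fun ab => pvD s ab.1 ab.2)).count "Cieplo"
      = l.countP (fun ab => ab.1 != ab.2 && PySem.Set.contains (PySem.Set.ofList s) ab.1) := by
  induction l with
  | nil => simp
  | cons ab l ih =>
      simp only [List.flatMap_cons, List.count_append, List.countP_cons, ih,
        pvD_count_cieplo, pvContains_ofList]
      split_ifs <;> omega

lemma pvPerm_rep (l : List String) (h : ∀ x ∈ l, x = "Cieplo" ∨ x = "Goraco") :
    l.Perm (List.replicate (l.count "Cieplo") "Cieplo" ++ List.replicate (l.count "Goraco") "Goraco") := by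
  induction l with
  | nil => simp
  | cons x l ih =>
      have hx := h x (by simp)
      have ih' := ih (fun y hy => h y (by simp [hy]))
      rcases hx with hx | hx <;> subst hx
      · simp only [List.count_cons_self, List.count_cons_of_ne (by decide : ("Cieplo" : String) ≠ "Goraco"),
          List.replicate_succ, List.cons_append]
        exact ih'.cons _
      · simp only [List.count_cons_self, List.count_cons_of_ne (by decide : ("Goraco" : String) ≠ "Cieplo"),
          List.replicate_succ]
        exact (ih'.cons _).trans List.perm_middle.symm

lemma pvRep_pairwise (c g : Nat) :
    (List.replicate c ("Cieplo" : String) ++ List.replicate g "Goraco").Pairwise (· ≤ ·) := by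
  apply List.pairwise_append.2
  refine ⟨List.pairwise_replicate.2 (Or.inr (le_refl _)),
    List.pairwise_replicate.2 (Or.inr (le_refl _)), ?_⟩
  intro a ha b hb
  rw [List.eq_of_mem_replicate ha, List.eq_of_mem_replicate hb, String.le_iff_toList_le]
  decide

-- ' '.join of the tokens equals B's space-suffixed flatten with the last space cut
lemma pvJoin_eq (L : List (List Char)) (h : L ≠ []) :
    PySem.Chars.join [' '] L = (List.flatten (L.map (fun x => x ++ [' ']))).dropLast := by
  induction L with
  | nil => exact absurd rfl h
  | cons a L ih =>
      cases L with
      | nil => simp [PySem.Chars.join_singleton]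
      | cons b L =>
          rw [PySem.Chars.join_cons_cons, ih (by simp)]
          simp only [List.map_cons, List.flatten_cons, List.dropLast_append]
          simp [List.append_assoc]

lemma pvTokC : "Cieplo".toList ++ [' '] = "Cieplo ".toList := by decide
lemma pvTokG : "Goraco".toList ++ [' '] = "Goraco ".toList := by decide

-- the two final branches agree once the counters are in hand
lemma pvFinal (c g : Nat) (w : List String)
    (hperm : w.Perm (List.replicate c "Cieplo" ++ List.replicate g "Goraco")) :
    (if w.length = 0 then "Zimno"
     else PySem.Str.join " " (PySem.List.sorted w (fun x => x) false))
    = (if (List.flatten (List.replicate c "Cieplo ".toList ++ List.replicate g "Goraco ".toList)).isEmpty = true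
       then "Zimno"
       else String.ofList (List.flatten (List.replicate c "Cieplo ".toList ++ List.replicate g "Goraco ".toList)).dropLast) := by
  have hlenw : w.length = c + g := by simpa using hperm.length_eq
  have hflatlen : (List.flatten (List.replicate c "Cieplo ".toList ++ List.replicate g "Goraco ".toList)).length = 7 * c + 7 * g := by
    simp [List.length_flatten, List.map_replicate, Nat.mul_comm]
  by_cases hz : c = 0 ∧ g = 0
  · have h1 : w.length = 0 := by omega
    have h2 : (List.flatten (List.replicate c "Cieplo ".toList ++ List.replicate g "Goraco ".toList)).isEmpty = true := by
      rw [List.isEmpty_iff_length_eq_zero, hflatlen]; omega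
    rw [if_pos h1, if_pos h2]
  · have h1 : ¬ w.length = 0 := by omega
    have h2 : ¬ (List.flatten (List.replicate c "Cieplo ".toList ++ List.replicate g "Goraco ".toList)).isEmpty = true := by
      rw [List.isEmpty_iff_length_eq_zero, hflatlen]; omega
    rw [if_neg h1, if_neg h2]
    rw [PySem.List.sorted_id_eq_of_perm_of_pairwise w
      (List.replicate c "Cieplo" ++ List.replicate g "Goraco") hperm.symm (pvRep_pairwise c g)]
    show String.ofList (PySem.Chars.join (" ".toList)
      ((List.replicate c ("Cieplo" : String) ++ List.replicate g "Goraco").map String.toList)) = _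
    congr 1
    rw [show (" " : String).toList = [' '] from rfl,
      show (List.replicate c ("Cieplo" : String) ++ List.replicate g "Goraco").map String.toList
        = List.replicate c "Cieplo".toList ++ List.replicate g "Goraco".toList by
          simp [List.map_replicate]]
    have hne : (List.replicate c ("Cieplo".toList) ++ List.replicate g ("Goraco".toList)) ≠ [] := by
      intro hnil
      rcases List.append_eq_nil_iff.mp hnil with ⟨h1', h2'⟩
      simp only [List.replicate_eq_nil_iff] at h1' h2'
      omega
    rw [pvJoin_eq _ hne]
    congr 1
    simp only [List.map_append, List.map_replicate, pvTokC, pvTokG]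

-- ===== VERDICT (by name: the statement is the Claim_ definition above) =====
theorem getWskazowki_spec : Claim_equal_getWskazowki := by
  intro proba sekretnaLiczba _ hpre
  unfold Spec_getWskazowki getWskazowki getWskazowki_alt
  by_cases heq : proba = sekretnaLiczba
  · simp [heq]
  · have hlen : proba.toList.length ≤ sekretnaLiczba.toList.length := by
      rcases hpre with h | h
      · exact absurd h heq
      · exact h
    simp only [beq_iff_eq, heq, if_false]
    set p := proba.toList with hp
    set s := sekretnaLiczba.toList with hs
    have hwsk : (PySem.List.pyRange 0 (p.length : Int) 1).foldl (pvStepA p s) []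
        = (p.zip s).flatMap (fun ab => pvD s ab.1 ab.2) := by
      rw [pvFoldA_eq_flatMap, pvW_eq_zip p s hlen]; simp
    set w := (p.zip s).flatMap (fun ab => pvD s ab.1 ab.2) with hw
    have hmem : ∀ x ∈ w, x = "Cieplo" ∨ x = "Goraco" := by
      intro x hx
      rw [hw, ← pvW_eq_zip p s hlen] at hx
      rcases List.mem_flatMap.1 hx with ⟨i, _, hxi⟩
      exact pvDelta_mem p s i x hxi
    have hcieplo : (p.zip s).countP (fun ab => ab.1 != ab.2 && PySem.Set.contains (PySem.Set.ofList s) ab.1) = w.count "Cieplo" := (pvCount_cieplo s (p.zip s)).symm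
    have hgoraco : (p.zip s).countP (fun ab => ab.1 == ab.2) = w.count "Goraco" := (pvCount_goraco s (p.zip s)).symm
    rw [hwsk]
    rw [hcieplo, hgoraco]
    exact pvFinal (w.count "Cieplo") (w.count "Goraco") w (pvPerm_rep w hmem)
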